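-- pv_equiv track=rewrite | github.com/maddawik/advent-of-code | python/2015/01/solution.py | Part2
-- ===== SOURCE A (Python) =====
-- def Part2(input: str) -> int:
--     floor = 0
--     index = 0
--     for c in input:
--         index += 1
--         match c:
--             case "(":
--                 floor += 1
--             case ")":
--                 floor -= 1
--         if floor < 0:
--             break
--     return index
-- ===== SOURCE B (Python) =====
-- def _first_neg(s, floor):
--     """Divide and conquer: (1-based index in s where the floor first goes
--     negative, or None, paired with the floor reached at that point / at the end)."""
--     if len(s) == 0:
--         return None, floor
--     if len(s) == 1:
--         floor += 1 if s == "(" else -1 if s == ")" else 0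
--         return (1 if floor < 0 else None), floor
--     mid = len(s) // 2
--     i, floor = _first_neg(s[:mid], floor)
--     if i is not None:
--         return i, floor
--     j, floor = _first_neg(s[mid:], floor)
--     return (mid + j if j is not None else None), floor
--
--
-- def Part2(input: str) -> int:
--     res, _ = _first_neg(input, 0)
--     return res if res is not None else len(input)
-- ===== Notes on version B (the rewrite author's own statement) =====
-- stated objective: alternative
-- what changed: Replaces A's single left-to-right tracking loop with early break by a recursive divide-and-conquer that splits the string in halves, solves the left half, and only descends into the right half (offsetting indices by mid) when the left never goes negative.
import Mathlib
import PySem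

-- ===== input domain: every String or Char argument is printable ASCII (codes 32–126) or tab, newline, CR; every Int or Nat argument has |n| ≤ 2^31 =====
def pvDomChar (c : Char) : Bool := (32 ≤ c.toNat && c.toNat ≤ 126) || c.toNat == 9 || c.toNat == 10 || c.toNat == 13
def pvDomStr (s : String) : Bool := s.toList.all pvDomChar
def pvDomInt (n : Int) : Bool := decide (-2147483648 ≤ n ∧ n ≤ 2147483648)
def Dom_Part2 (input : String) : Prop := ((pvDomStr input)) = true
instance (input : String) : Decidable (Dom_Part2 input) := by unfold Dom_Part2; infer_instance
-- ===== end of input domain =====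

-- B replaces A's linear tracking loop by a divide-and-conquer on string halves (alternative decomposition, same cost).

-- ===== PORT A =====
-- the for-loop with break, carrying (floor, index)
def Part2_loop : List Char → Int → Int → Int
  | [], _, index => index
  | c :: rest, floor, index =>
    let index := index + 1
    let floor := if c = '(' then floor + 1 else if c = ')' then floor - 1 else floor
    if floor < 0 then index else Part2_loop rest floor index

def Part2 (input : String) : Int := Part2_loop input.toList 0 0

-- ===== PORT B =====
-- _first_neg: divide and conquer on halves, returning (optional 1-based index, floor)
-- (mid = len(s)//2 is inlined at its three uses)
def Part2_firstNeg : List Char → Int → Option Int × Int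
  | [], floor => (none, floor)
  | [c], floor =>
    let floor := floor + (if c = '(' then 1 else if c = ')' then -1 else 0)
    ((if floor < 0 then some 1 else none), floor)
  | a :: b :: t, floor =>
    match Part2_firstNeg ((a :: b :: t).take ((a :: b :: t).length / 2)) floor with
    | (some i, f) => (some i, f)
    | (none, f) =>
      match Part2_firstNeg ((a :: b :: t).drop ((a :: b :: t).length / 2)) f with
      | (some j, f2) => (some ((((a :: b :: t).length / 2 : Nat) : Int) + j), f2)
      | (none, f2) => (none, f2)
termination_by s _ => s.length
decreasing_by
  · simp [List.length_take]; omega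
  · simp [List.length_drop]; omega

def Part2_alt (input : String) : Int :=
  match Part2_firstNeg input.toList 0 with
  | (some i, _) => i
  | (none, _) => (input.toList.length : Int)

-- ===== PRECONDITION & SPEC =====
def Spec_Part2 (input : String) (out : Int) : Prop := out = Part2_alt input
instance (input : String) (out : Int) : Decidable (Spec_Part2 input out) := by unfold Spec_Part2; infer_instance

-- ===== CLAIM (what is proved, stated in full; the proofs are below) =====
def Claim_equal_Part2 : Prop := ∀ (input : String), Dom_Part2 input → Spec_Part2 input (Part2 input)

-- ===== LEMMAS AND PROOFS =====
-- linear reference recursion used only by the proof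
def pvLin : List Char → Int → Option Int × Int
  | [], f => (none, f)
  | c :: rest, f =>
    let f' := f + (if c = '(' then 1 else if c = ')' then -1 else 0)
    if f' < 0 then (some 1, f')
    else
      match pvLin rest f' with
      | (o, ff) => (o.map (· + 1), ff)

theorem pvLin_append (l r : List Char) (f : Int) :
    pvLin (l ++ r) f =
      match pvLin l f with
      | (some i, ff) => (some i, ff)
      | (none, ff) =>
        match pvLin r ff with
        | (o, ff2) => (o.map (· + (l.length : Int)), ff2)
    := by
  induction l generalizing f with
  | nil =>
    simp only [List.nil_append, pvLin, List.length_nil]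
    rcases pvLin r f with ⟨o, ff⟩
    cases o <;> simp
  | cons c rest ih =>
    simp only [List.cons_append, pvLin]
    by_cases h : f + (if c = '(' then (1:Int) else if c = ')' then -1 else 0) < 0
    · simp [h]
    · simp only [if_neg h, ih]
      rcases hrest : pvLin rest (f + (if c = '(' then (1:Int) else if c = ')' then -1 else 0))
        with ⟨o, ff⟩
      cases o with
      | some i => simp
      | none =>
        rcases pvLin r ff with ⟨o2, ff2⟩
        cases o2 <;> simp [List.length_cons]

theorem firstNeg_aux : ∀ (n : Nat) (s : List Char), s.length ≤ n → ∀ f, Part2_firstNeg s f = pvLin s f := by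
  intro n
  induction n with
  | zero =>
    intro s hs f
    match s with
    | [] => simp [Part2_firstNeg, pvLin]
    | c :: rest => simp at hs
  | succ n ih =>
    intro s hs f
    match s with
    | [] => simp [Part2_firstNeg, pvLin]
    | [c] =>
      rw [Part2_firstNeg]
      simp only [pvLin]
      split_ifs <;> simp
    | a :: b :: t =>
      rw [Part2_firstNeg]
      conv_rhs => rw [← List.take_append_drop ((a :: b :: t).length / 2) (a :: b :: t)]
      rw [pvLin_append]
      simp only [List.length_cons] at hs ⊢
      have hlen_take : ((a :: b :: t).take ((t.length + 1 + 1) / 2)).length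
          = (t.length + 1 + 1) / 2 := by
        simp [List.length_take]; omega
      have h1 := ih ((a :: b :: t).take ((t.length + 1 + 1) / 2))
        (by rw [hlen_take]; omega) f
      have h2 := fun g => ih ((a :: b :: t).drop ((t.length + 1 + 1) / 2))
        (by simp only [List.length_drop, List.length_cons]; omega) g
      simp only [h1, h2, hlen_take]
      rcases pvLin ((a :: b :: t).take ((t.length + 1 + 1) / 2)) f with ⟨o, ff⟩
      cases o with
      | some i => simp
      | none =>
        simp only [h2]
        rcases pvLin ((a :: b :: t).drop ((t.length + 1 + 1) / 2)) ff with ⟨o2, ff2⟩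
        cases o2 <;> simp [Int.add_comm]

theorem firstNeg_eq_lin (s : List Char) (f : Int) : Part2_firstNeg s f = pvLin s f :=
  firstNeg_aux s.length s le_rfl f

theorem loop_eq_lin (s : List Char) (t i : Int) :
    Part2_loop s t i =
      match pvLin s t with
      | (some j, _) => i + j
      | (none, _) => i + (s.length : Int) := by
  induction s generalizing t i with
  | nil => simp [Part2_loop, pvLin]
  | cons c rest ih =>
    simp only [Part2_loop, pvLin]
    have e : (if c = '(' then t + 1 else if c = ')' then t - 1 else t)
        = t + (if c = '(' then (1:Int) else if c = ')' then -1 else 0) := by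
      split_ifs <;> ring
    rw [e]
    by_cases h : t + (if c = '(' then (1:Int) else if c = ')' then -1 else 0) < 0
    · simp [h]
    · simp only [if_neg h, ih]
      rcases pvLin rest (t + (if c = '(' then (1:Int) else if c = ')' then -1 else 0))
        with ⟨o, ff⟩
      cases o <;> simp [List.length_cons] <;> ring

-- ===== VERDICT (by name: the statement is the Claim_ definition above) =====
theorem Part2_spec : Claim_equal_Part2 := by
  intro input _
  unfold Spec_Part2 Part2 Part2_alt
  rw [firstNeg_eq_lin, loop_eq_lin]
  rcases pvLin input.toList 0 with ⟨o, ff⟩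
  cases o <;> simp
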